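-- pv_equiv track=rewrite | github.com/ISE-Lab-AI4LIFE/SANNER_2025 | src/hotflip_upranking/hotflip.py | gradient_propose_tokens
-- ===== SOURCE A (Python) =====
-- TOPK_PER_POS = 5      # mỗi vị trí lấy top-k token
--
-- VOCAB = ["alpha", "beta", "gamma", "delta", "epsilon", "zeta", "eta", "theta", "iota", "kappa"]
--
-- def gradient_propose_tokens(current_seq, queries, topk=TOPK_PER_POS):
--     """
--     Mô phỏng bước gradient-propose bằng cách
--     chọn ra top-k token có nhiều ký tự chung nhất với query.
--     """
--     T_per_j = []
--     for j in range(len(current_seq)):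
--         # Chọn ngẫu nhiên vài token ứng viên
--         scored_tokens = []
--         for tok in VOCAB:
--             # điểm = độ trùng ký tự với query
--             score = sum(tok.count(c) for c in "".join(queries))
--             scored_tokens.append((tok, score))
--         # lấy top-k
--         scored_tokens.sort(key=lambda x: x[1], reverse=True)
--         T_per_j.append([t for t, _ in scored_tokens[:topk]])
--     return T_per_j
-- ===== SOURCE B (Python) =====
-- TOPK_PER_POS = 5
--
-- VOCAB = ["alpha", "beta", "gamma", "delta", "epsilon", "zeta", "eta", "theta", "iota", "kappa"]
--
-- def gradient_propose_tokens(current_seq, queries, topk=TOPK_PER_POS):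
--     # Different strategy: build a character-frequency dict of the queries once, score each token
--     # by summing those frequencies over its own characters (no str.count scans), then rank tokens
--     # by grouping them into score buckets and emitting buckets in decreasing score order (a
--     # counting/bucket selection instead of sorting the token list); the top-k row is replicated.
--     freq = {}
--     for q in queries:
--         for c in q:
--             freq[c] = freq.get(c, 0) + 1
--     buckets = {}
--     for tok in VOCAB:
--         s = sum(freq.get(c, 0) for c in tok)
--         buckets.setdefault(s, []).append(tok)
--     ranked = []
--     for s in sorted(buckets, reverse=True):
--         ranked.extend(buckets[s])
--     return [ranked[:topk] for _ in current_seq]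
-- ===== Notes on version B (the rewrite author's own statement) =====
-- stated objective: faster
-- what changed: B builds a character-frequency dict of the queries once and scores each token by summing those frequencies over its own characters (instead of scanning the joined queries with tok.count per character, per position), then ranks tokens by grouping them into score buckets emitted in decreasing score order (no sort of the token list), and replicates the one top-k row across all positions.
import Mathlib
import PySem

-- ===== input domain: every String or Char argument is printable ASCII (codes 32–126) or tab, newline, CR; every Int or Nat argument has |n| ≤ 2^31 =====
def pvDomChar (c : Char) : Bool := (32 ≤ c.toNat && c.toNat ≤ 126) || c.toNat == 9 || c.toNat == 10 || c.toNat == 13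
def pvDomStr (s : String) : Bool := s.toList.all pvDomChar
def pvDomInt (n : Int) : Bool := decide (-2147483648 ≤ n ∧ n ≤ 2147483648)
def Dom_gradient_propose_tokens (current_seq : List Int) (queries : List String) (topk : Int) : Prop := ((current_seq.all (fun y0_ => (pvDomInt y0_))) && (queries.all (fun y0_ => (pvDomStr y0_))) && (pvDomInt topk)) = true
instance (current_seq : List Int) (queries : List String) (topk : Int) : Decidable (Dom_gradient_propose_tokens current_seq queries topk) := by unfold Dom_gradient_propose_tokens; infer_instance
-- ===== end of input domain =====

-- B replaces the per-position score/sort of the vocabulary by a character-frequency dict of the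
-- queries plus a score-bucket grouping (no sort of the token list), computed once and replicated.

-- ===== PORT A =====
def VOCAB : List String := ["alpha", "beta", "gamma", "delta", "epsilon", "zeta", "eta", "theta", "iota", "kappa"]

def gradient_propose_tokens (current_seq : List Int) (queries : List String) (topk : Int) : List (List String) :=
  -- for j in range(len(current_seq)): rebuild, sort and slice the scored vocabulary each time
  (PySem.List.pyRange 0 (current_seq.length : Int) 1).foldl
    (fun T_per_j _j =>
      let scored_tokens :=
        VOCAB.foldl
          (fun acc tok =>
            acc ++ [(tok,
              ((PySem.Str.join "" queries).toList.map
                (fun c => (PySem.Chars.count tok.toList [c] : Int))).sum)])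
          ([] : List (String × Int))
      let sorted_tokens := PySem.List.sorted scored_tokens (fun x => x.2) true
      T_per_j ++ [(PySem.List.slice sorted_tokens none (some topk)).map (fun t => t.1)])
    []

-- ===== PORT B =====
def gradient_propose_tokens_alt (current_seq : List Int) (queries : List String) (topk : Int) : List (List String) :=
  -- freq[c] = freq.get(c, 0) + 1 over all characters of all queries
  let freq : PySem.Dict Char Int :=
    queries.foldl (fun d q => q.toList.foldl (fun d c => d.insert c (d.getD c 0 + 1)) d)
      PySem.Dict.empty
  -- buckets.setdefault(score, []).append(tok)
  let buckets : PySem.Dict Int (List String) :=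
    VOCAB.foldl (fun d tok =>
      d.modify ((tok.toList.map (fun c => freq.getD c 0)).sum) [] (fun l => l ++ [tok]))
      PySem.Dict.empty
  -- for s in sorted(buckets, reverse=True): ranked.extend(buckets[s])
  let ranked :=
    (PySem.List.sorted buckets.keys (fun s => s) true).foldl
      (fun acc s => acc ++ buckets.getD s []) []
  current_seq.map (fun _ => PySem.List.slice ranked none (some topk))

-- ===== PRECONDITION & SPEC =====
def Spec_gradient_propose_tokens (current_seq : List Int) (queries : List String) (topk : Int) (out : List (List String)) : Prop := out = gradient_propose_tokens_alt current_seq queries topk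
instance (current_seq : List Int) (queries : List String) (topk : Int) (out : List (List String)) : Decidable (Spec_gradient_propose_tokens current_seq queries topk out) := by unfold Spec_gradient_propose_tokens; infer_instance

-- ===== CLAIM (what is proved, stated in full; the proofs are below) =====
def Claim_equal_gradient_propose_tokens : Prop := ∀ (current_seq : List Int) (queries : List String) (topk : Int), Dom_gradient_propose_tokens current_seq queries topk → Spec_gradient_propose_tokens current_seq queries topk (gradient_propose_tokens current_seq queries topk)

-- ===== LEMMAS AND PROOFS =====

-- counting a single character as a substring is counting the character
theorem chars_count_go_single (c : Char) (fuel : Nat) (l : List Char) (acc : Nat)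
    (h : l.length ≤ fuel) :
    PySem.Chars.count.go [c] fuel l acc = acc + l.count c := by
  induction fuel generalizing l acc with
  | zero =>
    have : l = [] := List.length_eq_zero_iff.mp (Nat.le_zero.mp h)
    subst this; simp [PySem.Chars.count.go]
  | succ n ih =>
    cases l with
    | nil => simp [PySem.Chars.count.go]
    | cons a t =>
      by_cases hc : c = a
      · subst hc
        have : PySem.Chars.count.go [c] (n+1) (c :: t) acc
            = PySem.Chars.count.go [c] n t (acc + 1) := by
          simp [PySem.Chars.count.go, List.isPrefixOf]
        rw [this, ih t (acc + 1) (by simpa using h)]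
        simp
        omega
      · have : PySem.Chars.count.go [c] (n+1) (a :: t) acc
            = PySem.Chars.count.go [c] n t acc := by
          simp [PySem.Chars.count.go, List.isPrefixOf, hc]
        rw [this, ih t acc (by simpa using h)]
        simp [(Ne.symm hc : a ≠ c)]

theorem chars_count_single (tok : List Char) (c : Char) :
    PySem.Chars.count tok [c] = tok.count c := by
  simp [PySem.Chars.count]
  have := chars_count_go_single c tok.length tok 0 le_rfl
  simpa using this

-- joining with the empty separator is concatenation
theorem join_empty_toList (qs : List String) :
    (PySem.Str.join "" qs).toList = qs.flatMap String.toList := by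
  rw [PySem.Str.toList_join]
  show PySem.Chars.join [] _ = _
  rw [PySem.Chars.join]
  rw [show qs.flatMap String.toList = (qs.map String.toList).flatten from by
    simp [List.flatMap]]
  generalize qs.map String.toList = parts
  induction parts with
  | nil => simp [List.intercalate]
  | cons a t ih =>
    cases t with
    | nil => simp [List.intercalate]
    | cons b t2 =>
      simp only [List.intercalate] at *
      simp [List.intersperse] at *
      simp [ih]

-- the query character-frequency dict looks up occurrence counts in the joined queries
theorem freq_getD (qs : List String) (d : PySem.Dict Char Int) (c : Char) :
    (qs.foldl (fun d q => q.toList.foldl (fun d c => d.insert c (d.getD c 0 + 1)) d) d).getD c 0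
      = d.getD c 0 + ((qs.flatMap String.toList).count c : Int) := by
  induction qs generalizing d with
  | nil => simp
  | cons q qs ih =>
    simp only [List.foldl_cons, List.flatMap_cons, List.count_append]
    rw [ih, PySem.Dict.getD_foldl_insert_add_one]
    push_cast; ring

-- double counting: summing tok.count(c) over the text = summing text.count(d) over tok
theorem count_sum_swap (L M : List Char) :
    (L.map (fun c => (M.count c : Int))).sum = (M.map (fun d => (L.count d : Int))).sum := by
  induction L with
  | nil => simp
  | cons c L ih =>
    simp only [List.map_cons, List.sum_cons, ih]
    have h1 : ∀ d : Char, ((c :: L).count d : Int)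
        = (L.count d : Int) + (if d == c then (1:Int) else 0) := by
      intro d; by_cases h : d = c
      · subst h; simp
      · simp [h, (Ne.symm h : c ≠ d)]
    simp only [h1]
    rw [List.sum_map_add]
    have h2 : (M.map (fun d => if d == c then (1:Int) else 0)).sum = (M.count c : Int) := by
      rw [PySem.List.sum_map_ite_one_zero]
      simp [List.count]
    rw [h2]; ring

-- a slice from the front commutes with map
theorem slice_map {α β : Type} (l : List α) (f : α → β) (b : Int) :
    (PySem.List.slice l none (some b)).map f = PySem.List.slice (l.map f) none (some b) := by
  simp [PySem.List.slice]


theorem insertBy_middle {α : Type} (before : α → α → Bool) (x : α) (l1 l2 : List α)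
    (h1 : ∀ b ∈ l1, before x b = false) (h2 : ∀ b ∈ l2, before x b = true) :
    PySem.List.insertBy before x (l1 ++ l2) = l1 ++ x :: l2 := by
  induction l1 with
  | nil =>
    cases l2 with
    | nil => simp [PySem.List.insertBy]
    | cons h t => simp [PySem.List.insertBy, h2 h (by simp)]
  | cons a l1 ih =>
    simp [PySem.List.insertBy, h1 a (by simp), ih (fun b hb => h1 b (by simp [hb]))]

theorem insertBy_exists {α : Type} (before : α → α → Bool) (x : α) (l : List α) :
    ∃ l1 l2, l = l1 ++ l2 ∧ PySem.List.insertBy before x l = l1 ++ x :: l2 ∧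
      (∀ b ∈ l1, before x b = false) ∧ (∀ h, l2.head? = some h → before x h = true) := by
  induction l with
  | nil => exact ⟨[], [], by simp [PySem.List.insertBy]⟩
  | cons a l ih =>
    by_cases h : before x a = true
    · exact ⟨[], a :: l, by simp [PySem.List.insertBy, h]⟩
    · obtain ⟨l1, l2, he, hi, hb, hh⟩ := ih
      rw [he] at hi
      refine ⟨a :: l1, l2, by simp [he], ?_, ?_, hh⟩
      · show PySem.List.insertBy before x (a :: l) = a :: l1 ++ x :: l2
        rw [show PySem.List.insertBy before x (a :: l)
            = a :: PySem.List.insertBy before x l from by simp [PySem.List.insertBy, h],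
          he, hi]
        simp
      · intro b hb'; rcases List.mem_cons.mp hb' with rfl | hm
        · simpa using h
        · exact hb b hm

-- strict descending pairwise for sorted-of-a-nodup-list
theorem sorted_rev_pairwise_gt (S : List Int) (hnd : S.Nodup) :
    (PySem.List.sorted S (fun s => s) true).Pairwise (fun a b => b < a) := by
  have h1 := PySem.List.sorted_pairwise_rev S (fun s => s)
  have h2 : (PySem.List.sorted S (fun s => s) true).Nodup :=
    ((PySem.List.sorted_perm S (fun s => s) true).nodup_iff).mpr hnd
  exact (h1.and h2).imp (fun {a b} ⟨hle, hne⟩ => lt_of_le_of_ne hle (Ne.symm hne))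

theorem sorted_rev_group {α : Type} (key : α → Int) (xs : List α) :
    PySem.List.sorted xs key true =
      (PySem.List.sorted (PySem.Set.ofList (xs.map key)) (fun s => s) true).flatMap
        (fun s => xs.filter (fun x => key x == s)) := by
  induction xs using List.reverseRecOn with
  | nil => simp [show PySem.List.sorted ([]:List α) key true = [] from
      (PySem.List.sorted_eq_nil_iff _ _ _).mpr rfl]
  | append_singleton xs x ih =>
    set S := PySem.Set.ofList (xs.map key) with hS
    set ks := PySem.List.sorted S (fun s => s) true with hks
    set F : Int → List α := fun s => xs.filter (fun y => key y == s) with hF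
    set F' : Int → List α := fun s => (xs ++ [x]).filter (fun y => key y == s) with hF'
    have hkey_mem : ∀ s, ∀ b ∈ F s, key b = s := by
      intro s b hb
      have := List.mem_filter.mp hb
      exact beq_iff_eq.mp this.2
    have hkspw : ks.Pairwise (fun a b => b < a) :=
      sorted_rev_pairwise_gt S (PySem.Set.nodup_ofList _)
    -- new key set
    have hSadd : PySem.Set.ofList ((xs ++ [x]).map key) = PySem.Set.add S (key x) := by
      rw [List.map_append, PySem.Set.ofList_eq_foldl, List.foldl_append, hS,
        PySem.Set.ofList_eq_foldl]
      simp
    -- LHS via insertBy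
    have hLHS : PySem.List.sorted (xs ++ [x]) key true =
        PySem.List.insertBy (fun a b => decide (key b < key a)) x
          (PySem.List.sorted xs key true) := by
      rw [PySem.List.sorted_rev_eq_foldl_insertBy, PySem.List.sorted_rev_eq_foldl_insertBy,
        List.foldl_append]
      simp
    -- unified decomposition
    obtain ⟨k1, k2, hdecomp, hk1, hk2, hsplit⟩ :
        ∃ k1 k2, PySem.List.sorted (PySem.Set.add S (key x)) (fun s => s) true
            = k1 ++ key x :: k2 ∧
          (∀ s ∈ k1, key x < s) ∧ (∀ s ∈ k2, s < key x) ∧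
          ks.flatMap F = k1.flatMap F ++ F (key x) ++ k2.flatMap F := by
      by_cases hmem : key x ∈ S
      · have hadd : PySem.Set.add S (key x) = S := by
          simp [PySem.Set.add, PySem.Set.contains, hmem]
        have hmemks : key x ∈ ks :=
          ((PySem.List.sorted_perm S (fun s => s) true).mem_iff).mpr hmem
        obtain ⟨k1, k2, hsp⟩ := List.append_of_mem hmemks
        have hpw := hsp ▸ hkspw
        have hpair := List.pairwise_append.mp hpw
        refine ⟨k1, k2, by rw [hadd, ← hks, hsp], ?_, ?_, ?_⟩
        · intro s hs; exact hpair.2.2 s hs (key x) (by simp)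
        · intro s hs; exact (List.pairwise_cons.mp hpair.2.1).1 s hs
        · rw [hsp]; simp [List.flatMap_append]
      · have hadd : PySem.Set.add S (key x) = S ++ [key x] := by
          simp [PySem.Set.add, PySem.Set.contains, hmem]
        have hins : PySem.List.sorted (S ++ [key x]) (fun s => s) true =
            PySem.List.insertBy (fun a b => decide (b < a)) (key x) ks := by
          rw [hks, PySem.List.sorted_rev_eq_foldl_insertBy,
            PySem.List.sorted_rev_eq_foldl_insertBy, List.foldl_append]
          simp
        obtain ⟨k1, k2, he, hi, hb, hh⟩ :=
          insertBy_exists (fun a b : Int => decide (b < a)) (key x) ks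
        have hFx : F (key x) = [] := by
          rw [hF]
          apply List.filter_eq_nil_iff.mpr
          intro y hy hbeq
          exact hmem ((PySem.Set.mem_ofList _ _).mpr
            (List.mem_map.mpr ⟨y, hy, beq_iff_eq.mp hbeq⟩))
        refine ⟨k1, k2, by rw [hadd, hins, hi], ?_, ?_, ?_⟩
        · intro s hs
          have hle : ¬ (s < key x) := by simpa using hb s hs
          have hne : s ≠ key x := by
            intro hrfl
            exact hmem (by
              have : s ∈ ks := he ▸ List.mem_append_left _ hs
              have := ((PySem.List.sorted_perm S (fun t => t) true).mem_iff).mp this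
              exact hrfl ▸ this)
          omega
        · intro s hs
          cases k2 with
          | nil => simp at hs
          | cons h2 t2 =>
            have hh2 : h2 < key x := by simpa using hh h2 rfl
            have hpw2 : (h2 :: t2).Pairwise (fun a b => b < a) :=
              ((List.pairwise_append.mp (he ▸ hkspw)).2.1)
            rcases List.mem_cons.mp hs with rfl | hm
            · exact hh2
            · exact lt_trans ((List.pairwise_cons.mp hpw2).1 s hm) hh2
        · rw [he, hFx]; simp [List.flatMap_append]
    -- assemble
    rw [hLHS, ih, hSadd, hdecomp, hsplit]
    have h1 : ∀ b ∈ k1.flatMap F ++ F (key x), (fun a b => decide (key b < key a)) x b = false := by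
      intro b hb
      rcases List.mem_append.mp hb with hb1 | hb2
      · obtain ⟨s, hs, hbs⟩ := List.mem_flatMap.mp hb1
        have := hkey_mem s b hbs
        simp [this]
        exact le_of_lt (hk1 s hs)
      · have := hkey_mem (key x) b hb2
        simp [this]
    have h2 : ∀ b ∈ k2.flatMap F, (fun a b => decide (key b < key a)) x b = true := by
      intro b hb
      obtain ⟨s, hs, hbs⟩ := List.mem_flatMap.mp hb
      have := hkey_mem s b hbs
      simp [this]
      exact hk2 s hs
    rw [show k1.flatMap F ++ F (key x) ++ k2.flatMap F
        = (k1.flatMap F ++ F (key x)) ++ k2.flatMap F by simp,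
      insertBy_middle _ x _ _ h1 h2]
    -- RHS
    rw [List.flatMap_append, List.flatMap_cons]
    have hc1 : k1.flatMap F' = k1.flatMap F := by
      apply List.flatMap_congr
      intro s hs
      have hne : key x ≠ s := ne_of_lt (hk1 s hs)
      rw [hF', hF]
      simp [List.filter_append, hne]
    have hc2 : k2.flatMap F' = k2.flatMap F := by
      apply List.flatMap_congr
      intro s hs
      have hne : key x ≠ s := ne_of_gt (hk2 s hs)
      rw [hF', hF]
      simp [List.filter_append, hne]
    have hcx : F' (key x) = F (key x) ++ [x] := by
      rw [hF', hF]; simp [List.filter_append]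
    rw [hc1, hc2, hcx]
    simp

-- ===== VERDICT (by name: the statement is the Claim_ definition above) =====
theorem gradient_propose_tokens_spec : Claim_equal_gradient_propose_tokens := by
  intro cs qs topk _hd
  unfold Spec_gradient_propose_tokens gradient_propose_tokens gradient_propose_tokens_alt
  simp only []
  set flat := qs.flatMap String.toList with hflatdef
  set Sc : String → Int := fun tok => (tok.toList.map (fun d => (flat.count d : Int))).sum
    with hSc
  -- A's per-token score equals Sc
  have hscoreA : ∀ tok : String,
      ((PySem.Str.join "" qs).toList.map
        (fun c => (PySem.Chars.count tok.toList [c] : Int))).sum = Sc tok := by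
    intro tok
    rw [join_empty_toList]
    have h : ∀ c, (PySem.Chars.count tok.toList [c] : Int) = (tok.toList.count c : Int) :=
      fun c => by rw [chars_count_single]
    simp only [h]
    exact count_sum_swap flat tok.toList
  -- B's per-token score equals Sc
  have hfreq : ∀ c,
      (qs.foldl (fun d q => q.toList.foldl (fun d c => d.insert c (d.getD c 0 + 1)) d)
        PySem.Dict.empty).getD c 0 = (flat.count c : Int) := by
    intro c; rw [freq_getD, ← hflatdef]; simp
  simp only [hfreq, hscoreA]
  have hB : ∀ tok : String,
      (tok.toList.map (fun c => ((flat.count c : Nat) : Int))).sum = Sc tok := fun _ => rfl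
  simp only [hB]
  simp only [PySem.List.foldl_append_singleton_eq_map, List.nil_append]
  -- buckets
  set buckets := VOCAB.foldl (fun d tok => d.modify (Sc tok) [] (fun l => l ++ [tok]))
    PySem.Dict.empty with hbuckets
  have hkeys : buckets.keys = PySem.Set.ofList (VOCAB.map Sc) := by
    rw [hbuckets, PySem.Dict.keys_foldl_modify_key VOCAB Sc ([] : List String)
      (fun _ tok l => l ++ [tok]) PySem.Dict.empty]
    simp [PySem.Set.update, PySem.Set.ofList_eq_foldl]
  have hgetD : ∀ s, buckets.getD s [] = VOCAB.filter (fun tok => Sc tok == s) := by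
    intro s
    rw [hbuckets, show VOCAB.foldl (fun d tok => d.modify (Sc tok) [] (fun l => l ++ [tok]))
          PySem.Dict.empty
        = (VOCAB.map (fun t => (Sc t, t))).foldl
            (fun d p => d.modify p.1 [] (fun l => l ++ [p.2])) PySem.Dict.empty from by
      rw [List.foldl_map]]
    rw [PySem.Dict.getD_foldl_modify_append]
    simp [List.filter_map, Function.comp_def]
  simp only [hkeys, hgetD]
  rw [PySem.List.foldl_append_eq_flatMap, List.nil_append]
  -- A side grouping
  rw [sorted_rev_group (fun p : String × Int => p.2) (VOCAB.map (fun tok => (tok, Sc tok)))]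
  simp only [slice_map, List.map_flatMap, List.filter_map, List.map_map, Function.comp_def,
    List.map_const', PySem.List.length_pyRange_one, Int.sub_zero, Int.toNat_natCast]
  simp
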